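-- pv_equiv track=rewrite | github.com/Chaste/Old-Chaste-svn-mirror | python/pycml/processors.py | _find_common_tail
-- ===== SOURCE A (Python) =====
-- def _find_common_tail(l1, l2):
--     """Find the first element at which both lists are identical from then on."""
--     i = -1
--     try:
--         while l1[i] == l2[i]:
--             i -= 1
--     except IndexError:
--         # One list is the tail of the other
--         pass
--     # i now gives the last differing element
--     assert i < -1
--     return i+1
-- ===== SOURCE B (Python) =====
-- def _find_common_tail(l1, l2):
--     """Find the first element at which both lists are identical from then on."""
--     # The predicate "the last k elements of both lists are equal" is downward
--     # closed in k, so the maximal such k can be found by binary search on k.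
--     lo, hi = 0, min(len(l1), len(l2))
--     while lo < hi:
--         mid = (lo + hi + 1) // 2
--         if l1[len(l1) - mid:] == l2[len(l2) - mid:]:
--             lo = mid
--         else:
--             hi = mid - 1
--     assert lo
--     return -lo
-- ===== Notes on version B (the rewrite author's own statement) =====
-- stated objective: alternative
-- what changed: B binary-searches the maximal k for which the length-k suffixes (compared as whole slices) are equal, instead of A's element-by-element backwards scan with negative indices terminated by catching IndexError; Pre_ excludes inputs where a list is empty or the last elements differ, on which both A and B raise AssertionError.
import Mathlib
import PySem

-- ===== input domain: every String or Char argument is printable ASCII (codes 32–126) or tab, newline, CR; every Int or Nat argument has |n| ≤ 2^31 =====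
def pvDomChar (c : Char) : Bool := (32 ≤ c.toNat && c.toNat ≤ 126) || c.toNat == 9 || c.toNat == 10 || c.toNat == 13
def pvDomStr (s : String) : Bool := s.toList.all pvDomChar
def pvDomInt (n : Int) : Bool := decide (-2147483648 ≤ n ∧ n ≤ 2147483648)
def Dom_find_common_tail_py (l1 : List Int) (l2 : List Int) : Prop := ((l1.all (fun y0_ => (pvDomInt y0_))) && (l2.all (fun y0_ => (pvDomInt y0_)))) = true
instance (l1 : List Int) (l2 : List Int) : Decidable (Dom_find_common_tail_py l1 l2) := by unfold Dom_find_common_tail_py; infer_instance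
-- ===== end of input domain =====

-- B finds the common-tail length by binary search on k over the downward-closed predicate
-- "the length-k suffixes are equal" (whole-slice comparison), replacing A's backwards
-- negative-index scan terminated by catching IndexError (objective: alternative).


-- ===== PORT A =====
-- A's while-loop: i starts at -1 and decrements while l1[i] == l2[i]; an out-of-range
-- index (Python IndexError, pyGet? = none) ends the loop.  k encodes i = -(k+1).
def aLoop (l1 l2 : List Int) (k : Nat) : Int :=
  match h1 : PySem.List.pyGet? l1 (-((k : Int) + 1)), h2 : PySem.List.pyGet? l2 (-((k : Int) + 1)) with
  | some a, some b =>
      if a = b then aLoop l1 l2 (k + 1) else -((k : Int) + 1)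
  | _, _ => -((k : Int) + 1)
termination_by l1.length + 1 - k
decreasing_by
  have hr : PySem.Raise.InRange l1.length (-((k : Int) + 1)) := by
    by_contra hc
    rw [← PySem.List.pyGet?_eq_none_iff] at hc
    rw [hc] at h1
    simp at h1
  unfold PySem.Raise.InRange at hr
  omega

-- the assert only raises; on Pre_ inputs it passes, so the port returns i+1
def find_common_tail_py (l1 : List Int) (l2 : List Int) : Int :=
  aLoop l1 l2 0 + 1

-- ===== PORT B =====
-- Source B's while-loop: binary search on lo..hi; the slice l1[len(l1)-mid:] has a
-- nonnegative start ≤ length (1 ≤ mid ≤ hi ≤ min), so it is exactly List.drop.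
def bSearch (l1 l2 : List Int) (lo hi : Nat) : Nat :=
  if lo < hi then
    -- mid = (lo + hi + 1) // 2, written inline
    if l1.drop (l1.length - (lo + hi + 1) / 2) = l2.drop (l2.length - (lo + hi + 1) / 2)
    then bSearch l1 l2 ((lo + hi + 1) / 2) hi
    else bSearch l1 l2 lo ((lo + hi + 1) / 2 - 1)
  else lo
termination_by hi - lo
decreasing_by all_goals omega

-- the assert only raises; on Pre_ inputs it passes, so the port returns -lo
def find_common_tail_py_alt (l1 : List Int) (l2 : List Int) : Int :=
  -((bSearch l1 l2 0 (min l1.length l2.length) : Int))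

-- ===== PRECONDITION & SPEC =====
-- Pre_ excludes exactly the inputs where A raises AssertionError (assert i < -1):
-- an empty list or differing last elements.  (B's assert raises on the same inputs.)
def Pre_find_common_tail_py (l1 : List Int) (l2 : List Int) : Prop :=
  l1 ≠ [] ∧ l1.getLast? = l2.getLast?
instance (l1 : List Int) (l2 : List Int) : Decidable (Pre_find_common_tail_py l1 l2) := by
  unfold Pre_find_common_tail_py; infer_instance
def pvWitness_find_common_tail_py : List Int × List Int := ([1, 2, 3], [9, 2, 3])

def Spec_find_common_tail_py (l1 : List Int) (l2 : List Int) (out : Int) : Prop := out = find_common_tail_py_alt l1 l2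
instance (l1 : List Int) (l2 : List Int) (out : Int) : Decidable (Spec_find_common_tail_py l1 l2 out) := by unfold Spec_find_common_tail_py; infer_instance

-- ===== CLAIM (what is proved, stated in full; the proofs are below) =====
def Claim_equal_find_common_tail_py : Prop := ∀ (l1 : List Int) (l2 : List Int), Dom_find_common_tail_py l1 l2 → Pre_find_common_tail_py l1 l2 → Spec_find_common_tail_py l1 l2 (find_common_tail_py l1 l2)

-- ===== LEMMAS AND PROOFS =====

def tailCount (zs : List (Int × Int)) : Nat :=
  match zs with
  | [] => 0
  | (a, b) :: rest => if a ≠ b then 0 else tailCount rest + 1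

-- the length of the common tail, as a proof-side measuring stick for both ports
def cTail (l1 l2 : List Int) : Nat := tailCount (l1.reverse.zip l2.reverse)

lemma tailCount_le (zs : List (Int × Int)) : tailCount zs ≤ zs.length := by
  induction zs with
  | nil => simp [tailCount]
  | cons p rest ih => obtain ⟨a, b⟩ := p; simp only [tailCount]; split <;> simp; omega

lemma pyGet?_neg_succ_reverse (l : List Int) (k : Nat) :
    PySem.List.pyGet? l (-((k : Int) + 1)) = l.reverse[k]? := by
  by_cases hk : k < l.length
  · have h1 : PySem.List.pyGet? l (-((k + 1 : Nat) : Int)) = l[l.length - (k + 1)]? :=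
      PySem.List.pyGet?_neg_natCast l (k + 1) (by omega) (by omega)
    push_cast at h1
    rw [h1, List.getElem?_reverse hk]
    congr 1
    omega
  · have h1 : PySem.List.pyGet? l (-((k : Int) + 1)) = none := by
      rw [PySem.List.pyGet?_eq_none_iff]
      unfold PySem.Raise.InRange
      omega
    rw [h1, List.getElem?_eq_none (by simp; omega)]

lemma aLoop_eq (l1 l2 : List Int) (k : Nat) :
    aLoop l1 l2 k = -((k : Int) + (tailCount ((l1.reverse.zip l2.reverse).drop k) : Int)) - 1 := by
  rw [aLoop.eq_def]
  split
  · rename_i a b h1 h2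
    rw [pyGet?_neg_succ_reverse] at h1 h2
    obtain ⟨hk1, ha⟩ := List.getElem?_eq_some_iff.mp h1
    obtain ⟨hk2, hb⟩ := List.getElem?_eq_some_iff.mp h2
    simp only [List.length_reverse] at hk1 hk2
    have hk : k < (l1.reverse.zip l2.reverse).length := by
      simp only [List.length_zip, List.length_reverse]
      omega
    have hdrop : (l1.reverse.zip l2.reverse).drop k
        = (a, b) :: (l1.reverse.zip l2.reverse).drop (k + 1) := by
      rw [List.drop_eq_getElem_cons hk]
      congr 1
      rw [List.getElem_zip, ha, hb]
    rw [hdrop]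
    by_cases he : a = b
    · rw [if_pos he, aLoop_eq l1 l2 (k + 1), tailCount, if_neg (by simpa using he)]
      push_cast
      ring
    · rw [if_neg he, tailCount, if_pos he]
      push_cast
      ring
  · rename_i hno
    rw [pyGet?_neg_succ_reverse l1 k, pyGet?_neg_succ_reverse l2 k] at hno
    have hnil : (l1.reverse.zip l2.reverse).drop k = [] := by
      apply List.drop_eq_nil_of_le
      simp only [List.length_zip, List.length_reverse]
      by_contra hlt
      push Not at hlt
      have hq1 : k < l1.reverse.length := by simp; omega
      have hq2 : k < l2.reverse.length := by simp; omega
      exact hno _ _ (List.getElem?_eq_getElem hq1) (List.getElem?_eq_getElem hq2)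
    rw [hnil]
    simp [tailCount]
    ring
termination_by (l1.reverse.zip l2.reverse).length - k
decreasing_by
  simp only [List.length_zip, List.length_reverse] at *
  omega

-- "the first k elements agree" ↔ "k ≤ length of the matching prefix"
lemma take_eq_iff_le_tailCount (a : List Int) : ∀ (b : List Int) (k : Nat),
    k ≤ a.length → k ≤ b.length → (a.take k = b.take k ↔ k ≤ tailCount (a.zip b)) := by
  induction a with
  | nil =>
    intro b k h1 _
    have hk0 : k = 0 := by simpa using h1
    subst hk0; simp
  | cons x a ih =>
    intro b k h1 h2
    cases b with
    | nil =>
      have hk0 : k = 0 := by simpa using h2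
      subst hk0; simp
    | cons y b =>
      cases k with
      | zero => simp
      | succ k =>
        simp only [List.take_succ_cons, List.zip_cons_cons, tailCount]
        by_cases hxy : x = y
        · subst hxy
          rw [if_neg (by simp)]
          simp only [List.cons.injEq, true_and]
          rw [ih b k (by simpa using h1) (by simpa using h2)]
          omega
        · rw [if_pos hxy]
          constructor
          · intro h
            exact absurd (List.cons.injEq .. ▸ h).1 hxy
          · omega

-- suffix equality stated on drops ↔ the same on prefixes of the reversed lists
lemma drop_eq_reverse_take (l : List Int) (k : Nat) (hk : k ≤ l.length) :
    l.drop (l.length - k) = (l.reverse.take k).reverse := by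
  rw [← List.reverse_reverse (l.drop (l.length - k)), List.reverse_drop,
    show l.length - (l.length - k) = k by omega]

-- suffix equality stated on drops ↔ a bound on the common-tail length
lemma suffix_eq_iff (l1 l2 : List Int) (k : Nat) (h1 : k ≤ l1.length) (h2 : k ≤ l2.length) :
    (l1.drop (l1.length - k) = l2.drop (l2.length - k)) ↔ k ≤ cTail l1 l2 := by
  rw [drop_eq_reverse_take l1 k h1, drop_eq_reverse_take l2 k h2, List.reverse_inj, cTail]
  exact take_eq_iff_le_tailCount l1.reverse l2.reverse k (by simpa) (by simpa)

lemma bSearch_eq (l1 l2 : List Int) (lo hi : Nat)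
    (hhi : hi ≤ min l1.length l2.length)
    (h1 : lo ≤ cTail l1 l2) (h2 : cTail l1 l2 ≤ hi) :
    bSearch l1 l2 lo hi = cTail l1 l2 := by
  rw [bSearch.eq_def]
  split
  · rename_i hlt
    have hmid1 : lo < (lo + hi + 1) / 2 := by omega
    have hmid2 : (lo + hi + 1) / 2 ≤ hi := by omega
    split
    · rename_i heq
      have : (lo + hi + 1) / 2 ≤ cTail l1 l2 :=
        (suffix_eq_iff l1 l2 _ (by omega) (by omega)).mp heq
      exact bSearch_eq l1 l2 _ hi hhi this h2
    · rename_i hne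
      have : ¬ ((lo + hi + 1) / 2 ≤ cTail l1 l2) := fun hle =>
        hne ((suffix_eq_iff l1 l2 _ (by omega) (by omega)).mpr hle)
      exact bSearch_eq l1 l2 lo _ (by omega) h1 (by omega)
  · omega
termination_by hi - lo
decreasing_by all_goals omega

-- ===== VERDICT (by name: the statement is the Claim_ definition above) =====
theorem find_common_tail_py_spec : Claim_equal_find_common_tail_py := by
  intro l1 l2 _ _
  unfold Spec_find_common_tail_py find_common_tail_py find_common_tail_py_alt
  rw [aLoop_eq, bSearch_eq l1 l2 0 (min l1.length l2.length)
      (le_refl _) (Nat.zero_le _)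
      (by simpa [List.length_zip] using tailCount_le (l1.reverse.zip l2.reverse))]
  simp [cTail]
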